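-- pv_equiv track=rewrite | github.com/mingyeongho/codingTest | BOJ/스택의 활용/3986_좋은 단어/solution.py | solution
-- ===== SOURCE A (Python) =====
-- def solution(s) -> bool:
--     stk = []
--     for w in s:
--         if stk and stk[-1] == w:
--             stk.pop()
--         else:
--             stk.append(w)
--     return False if stk else True
-- ===== SOURCE B (Python) =====
-- def solution(s) -> bool:
--     chars = list(s)
--     changed = True
--     while changed:
--         changed = False
--         out = []
--         i = 0
--         n = len(chars)
--         while i < n:
--             if i + 1 < n and chars[i] == chars[i + 1]:
--                 i += 2
--                 changed = True
--             else:
--                 out.append(chars[i])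
--                 i += 1
--         chars = out
--     return not chars
-- ===== Notes on version B (the rewrite author's own statement) =====
-- stated objective: alternative
-- what changed: Replaces the single-pass stack with repeated full scans that delete every adjacent equal pair until a fixpoint, returning True iff the fixpoint is empty (pair-cancellation is confluent, so the fixpoint equals the stack residue).
import Mathlib
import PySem

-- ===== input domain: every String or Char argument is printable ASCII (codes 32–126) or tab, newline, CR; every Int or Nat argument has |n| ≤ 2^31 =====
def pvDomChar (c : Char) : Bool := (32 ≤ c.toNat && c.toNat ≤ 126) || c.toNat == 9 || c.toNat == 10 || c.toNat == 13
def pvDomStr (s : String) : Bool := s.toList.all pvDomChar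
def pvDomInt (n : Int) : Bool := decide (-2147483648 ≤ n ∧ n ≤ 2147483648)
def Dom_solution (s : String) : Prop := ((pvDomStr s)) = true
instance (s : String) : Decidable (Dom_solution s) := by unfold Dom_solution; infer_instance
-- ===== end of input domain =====

-- B replaces A's single-pass stack with repeated adjacent-pair-deletion passes to a
-- fixpoint (alternative decomposition, not faster); True iff the fixpoint is empty.

-- ===== PORT A =====
-- A's stack step: 'if stk and stk[-1] == w: stk.pop() else: stk.append(w)'
def aStep (stk : List Char) (w : Char) : List Char :=
  if stk ≠ [] ∧ stk.getLast? = some w then stk.dropLast else stk ++ [w]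

def solution (s : String) : Bool :=
  let stk := s.toList.foldl aStep []
  if stk = [] then true else false

-- ===== PORT B =====
-- one left-to-right scan: delete each adjacent equal pair, report whether anything changed
def onePass : List Char → List Char × Bool
  | a :: b :: t =>
      if a = b then ((onePass t).1, true)
      else ((a :: (onePass (b :: t)).1), (onePass (b :: t)).2)
  | [a] => ([a], false)
  | [] => ([], false)

theorem onePass_len_le : ∀ l : List Char, (onePass l).1.length ≤ l.length
  | a :: b :: t => by
      simp only [onePass]
      split
      · have := onePass_len_le t; simp; omega
      · have := onePass_len_le (b :: t); simp at this ⊢; omega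
  | [a] => by simp [onePass]
  | [] => by simp [onePass]

theorem onePass_len_lt : ∀ l : List Char, (onePass l).2 = true → (onePass l).1.length < l.length
  | a :: b :: t => by
      simp only [onePass]
      split
      · intro _
        have := onePass_len_le t
        simp; omega
      · intro h
        have hlt := onePass_len_lt (b :: t) (by simpa using h)
        simp at hlt ⊢; omega
  | [a] => by simp [onePass]
  | [] => by simp [onePass]

-- outer while loop: repeat the pass until no change
def reduceFix (l : List Char) : List Char :=
  if h : (onePass l).2 = true then reduceFix (onePass l).1 else (onePass l).1
termination_by l.length
decreasing_by exact onePass_len_lt l h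

def solution_alt (s : String) : Bool := (reduceFix s.toList).isEmpty

-- ===== PRECONDITION & SPEC =====
def Spec_solution (s : String) (out : Bool) : Prop := out = solution_alt s
instance (s : String) (out : Bool) : Decidable (Spec_solution s out) := by unfold Spec_solution; infer_instance

-- ===== CLAIM (what is proved, stated in full; the proofs are below) =====
def Claim_equal_solution : Prop := ∀ (s : String), Dom_solution s → Spec_solution s (solution s)

-- ===== LEMMAS AND PROOFS =====

-- reversed-stack version of A's step (stack kept head-first)
def rStep (st : List Char) (w : Char) : List Char :=
  match st with
  | [] => [w]
  | x :: xs => if x = w then xs else w :: x :: xs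

theorem aStep_eq_rStep (st : List Char) (w : Char) :
    aStep st w = (rStep st.reverse w).reverse := by
  cases h : st.reverse with
  | nil =>
      have : st = [] := by simpa using congrArg List.reverse h
      subst this; simp [aStep, rStep]
  | cons x xs =>
      have hst : st = xs.reverse ++ [x] := by
        have := congrArg List.reverse h; simpa using this
      subst hst
      by_cases hxw : x = w <;> simp [aStep, rStep, hxw]

theorem foldl_aStep_eq (st : List Char) (l : List Char) :
    l.foldl aStep st = (l.foldl rStep st.reverse).reverse := by
  induction l generalizing st with
  | nil => simp
  | cons a t ih =>
      simp only [List.foldl_cons, aStep_eq_rStep]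
      rw [ih]
      simp

-- the stack never holds two adjacent equal characters
theorem chain'_rStep {st : List Char} (h : st.IsChain (· ≠ ·)) (w : Char) :
    (rStep st w).IsChain (· ≠ ·) := by
  cases st with
  | nil => simp [rStep]
  | cons x xs =>
      by_cases hxw : x = w
      · simp only [rStep, if_pos hxw]; exact h.tail
      · simp only [rStep, if_neg hxw]
        exact (List.isChain_cons.mpr ⟨fun y hy => by simp at hy; exact fun e => hxw (hy ▸ e.symm), h⟩)

-- cancelling one adjacent pair does not change the run, given the stack invariant
theorem rrun_cancel {st : List Char} (h : st.IsChain (· ≠ ·)) (a : Char) (l : List Char) :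
    (a :: a :: l).foldl rStep st = l.foldl rStep st := by
  cases st with
  | nil => simp [rStep]
  | cons x xs =>
      by_cases hxa : x = a
      · subst hxa
        cases xs with
        | nil => simp [rStep]
        | cons y ys =>
            have hxy : x ≠ y := h.rel_head
            simp [rStep, Ne.symm hxy]
      · simp [rStep, hxa]

-- one pass preserves the run
theorem rrun_onePass : ∀ (l : List Char) {st : List Char}, st.IsChain (· ≠ ·) →
    (onePass l).1.foldl rStep st = l.foldl rStep st
  | a :: b :: t, st, h => by
      by_cases hab : a = b
      · subst hab
        rw [rrun_cancel h a t]
        simpa [onePass] using rrun_onePass t h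
      · have h' : (rStep st a).IsChain (· ≠ ·) := chain'_rStep h a
        simpa [onePass, hab] using rrun_onePass (b :: t) h'
  | [a], st, _ => by simp [onePass]
  | [], st, _ => by simp [onePass]

-- if the pass reports no change, the list had no adjacent equal pair (and is unchanged)
theorem onePass_fix : ∀ l : List Char, (onePass l).2 = false →
    (onePass l).1 = l ∧ l.IsChain (· ≠ ·)
  | a :: b :: t => by
      by_cases hab : a = b
      · simp [onePass, hab]
      · intro hfl
        have hfl' : (onePass (b :: t)).2 = false := by
          simpa [onePass, hab] using hfl
        obtain ⟨h1, h2⟩ := onePass_fix (b :: t) hfl'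
        constructor
        · simp [onePass, hab, h1]
        · exact h2.cons (fun y hy => by simp at hy; exact hy ▸ hab)
  | [a] => by simp [onePass]
  | [] => by simp [onePass]

-- a chain'-list is its own stack run (the stack only ever pushes)
theorem rrun_of_chain' : ∀ (l st : List Char), (l.reverse ++ st).IsChain (· ≠ ·) →
    l.foldl rStep st = l.reverse ++ st
  | [], st, _ => by simp
  | a :: t, st, h => by
      have h' : (t.reverse ++ (a :: st)).IsChain (· ≠ ·) := by
        simpa using h
      cases st with
      | nil =>
          simpa [rStep] using rrun_of_chain' t [a] h'
      | cons x xs =>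
          have hax : a ≠ x := (h'.right_of_append).rel_head
          simpa [rStep, Ne.symm hax, hax] using rrun_of_chain' t (a :: x :: xs) h'

-- the fixpoint preserves the run
theorem rrun_reduceFix (l : List Char) {st : List Char} (h : st.IsChain (· ≠ ·)) :
    (reduceFix l).foldl rStep st = l.foldl rStep st := by
  rw [reduceFix]
  split
  · rw [rrun_reduceFix (onePass l).1 h, rrun_onePass l h]
  · rw [rrun_onePass l h]
termination_by l.length
decreasing_by exact onePass_len_lt l (by assumption)

-- the fixpoint has no adjacent equal pair
theorem chain'_reduceFix (l : List Char) : (reduceFix l).IsChain (· ≠ ·) := by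
  rw [reduceFix]
  split
  · exact chain'_reduceFix (onePass l).1
  · have hfix := onePass_fix l (by simpa using ‹¬(onePass l).2 = true›)
    rw [hfix.1]; exact hfix.2
termination_by l.length
decreasing_by exact onePass_len_lt l (by assumption)

-- A's final stack IS B's fixpoint
theorem stack_eq_reduceFix (l : List Char) : l.foldl aStep [] = reduceFix l := by
  have hc : ([] : List Char).IsChain (· ≠ ·) := by simp
  have h1 : l.foldl rStep [] = (reduceFix l).reverse ++ [] := by
    rw [← rrun_reduceFix l hc]
    exact rrun_of_chain' (reduceFix l) [] (by
      simpa using List.isChain_reverse.mpr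
        ((chain'_reduceFix l).imp (fun {a b} h => Ne.symm h)))
  rw [foldl_aStep_eq]
  simp at h1
  simp [h1]

-- ===== VERDICT (by name: the statement is the Claim_ definition above) =====
theorem solution_spec : Claim_equal_solution := by
  intro s _
  unfold Spec_solution solution solution_alt
  rw [stack_eq_reduceFix]
  cases reduceFix s.toList <;> simp
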